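-- pv_equiv track=rewrite | github.com/sseongeun/Baekjoon | 프로그래머스/1/12947. 하샤드 수/하샤드 수.py | solution
-- ===== SOURCE A (Python) =====
-- def solution(x):
--
--     sum=0
--     l=list(map(int,str(x)))
--
--     for i in l:
--         sum+=i
--
--     if x%sum==0:
--         return True
--     else:
--         return False
-- ===== SOURCE B (Python) =====
-- def solution(x):
--     s, y = 0, x
--     while y > 0:
--         s += y % 10
--         y //= 10
--     return x % s == 0
-- ===== Notes on version B (the rewrite author's own statement) =====
-- stated objective: idiomatic
-- what changed: B extracts digits arithmetically with a while loop (y % 10, y //= 10) instead of converting to a string and mapping int over its characters.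
import Mathlib
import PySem

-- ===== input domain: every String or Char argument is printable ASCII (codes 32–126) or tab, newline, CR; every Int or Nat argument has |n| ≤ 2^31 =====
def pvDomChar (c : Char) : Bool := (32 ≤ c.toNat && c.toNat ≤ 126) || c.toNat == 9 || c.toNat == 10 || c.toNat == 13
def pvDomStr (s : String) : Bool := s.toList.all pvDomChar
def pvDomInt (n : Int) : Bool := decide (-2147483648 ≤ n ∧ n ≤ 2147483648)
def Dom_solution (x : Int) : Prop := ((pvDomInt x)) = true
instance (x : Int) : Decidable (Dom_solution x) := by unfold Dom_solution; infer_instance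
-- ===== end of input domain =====

-- B replaces A's str→map(int)→loop digit traversal by arithmetic digit extraction (y % 10, y //= 10); same True/False result on x ≥ 1.


-- ===== PORT A =====
-- int(single character), as A's map(int, str(x)) applies it; getD 0 is never reached under Pre_ (every char is a digit)
def pvCharVal (c : Char) : Int := (PySem.Int.ofChars? [c]).getD 0

def solution (x : Int) : Bool :=
  let l := (PySem.Int.toChars x).map pvCharVal
  let s := l.foldl (· + ·) 0
  if PySem.Int.mod x s = 0 then true else false

-- ===== PORT B =====
-- while y > 0: s += y % 10; y //= 10
def pvDigitLoop (y s : Int) : Int :=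
  if h : 0 < y then
    pvDigitLoop (PySem.Int.floordiv y 10) (s + PySem.Int.mod y 10)
  else s
termination_by y.toNat
decreasing_by
  rw [PySem.Int.floordiv_eq_ediv_of_pos (by omega)]
  omega

def solution_alt (x : Int) : Bool :=
  decide (PySem.Int.mod x (pvDigitLoop x 0) = 0)

-- ===== PRECONDITION & SPEC =====
-- Pre_ excludes exactly the inputs where A raises: x < 0 (ValueError from int('-')) and x = 0 (ZeroDivisionError, digit sum 0)
def Pre_solution (x : Int) : Prop := 1 ≤ x
instance (x : Int) : Decidable (Pre_solution x) := by unfold Pre_solution; infer_instance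
def pvWitness_solution : Int := 10
def Spec_solution (x : Int) (out : Bool) : Prop := out = solution_alt x
instance (x : Int) (out : Bool) : Decidable (Spec_solution x out) := by unfold Spec_solution; infer_instance

-- ===== CLAIM (what is proved, stated in full; the proofs are below) =====
def Claim_equal_solution : Prop := ∀ (x : Int), Dom_solution x → Pre_solution x → Spec_solution x (solution x)

-- ===== LEMMAS AND PROOFS =====

-- mathematical digit sum, the common value of both loops
def pvS (n : Nat) : Nat :=
  if n = 0 then 0 else n % 10 + pvS (n / 10)
decreasing_by omega

theorem pvCharVal_digitChar (m : Nat) (hm : m < 10) :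
    pvCharVal (Nat.digitChar m) = (m : Int) := by
  interval_cases m <;> decide

theorem pvS_of_div_zero (n : Nat) (h : n / 10 = 0) : pvS n = n % 10 := by
  rw [pvS.eq_def]
  split_ifs with h0
  · simp [h0]
  · rw [h, pvS.eq_def]; norm_num

theorem toDigitsCore_map_sum (fuel : Nat) : ∀ (n : Nat), n < fuel → ∀ (ds : List Char),
    ((Nat.toDigitsCore 10 fuel n ds).map pvCharVal).sum
      = (pvS n : Int) + ((ds.map pvCharVal).sum) := by
  induction fuel with
  | zero => intro n h; omega
  | succ fuel ih =>
    intro n h ds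
    rw [Nat.toDigitsCore]
    by_cases hd : n / 10 = 0
    · simp only [hd, if_true]
      rw [List.map_cons, List.sum_cons, pvCharVal_digitChar _ (Nat.mod_lt _ (by omega)),
        pvS_of_div_zero n hd]
    · simp only [hd, if_false]
      rw [ih (n / 10) (by omega) (Nat.digitChar (n % 10) :: ds)]
      rw [List.map_cons, List.sum_cons, pvCharVal_digitChar _ (Nat.mod_lt _ (by omega))]
      have hn : n ≠ 0 := by omega
      conv_rhs => rw [pvS.eq_def]
      rw [if_neg hn]
      push_cast; ring

theorem digitLoop_eq (n : Nat) : ∀ s : Int, pvDigitLoop (n : Int) s = s + (pvS n : Int) := by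
  induction n using Nat.strong_induction_on with
  | _ n ih =>
    intro s
    rw [pvDigitLoop]
    by_cases h0 : 0 < n
    · simp only [show (0:Int) < (n:Int) from by exact_mod_cast h0, dif_pos]
      rw [PySem.Int.floordiv_eq_ediv_of_pos (by omega),
        PySem.Int.mod_eq_emod_of_pos (by omega)]
      have hdiv : ((n : Int) / 10) = ((n / 10 : Nat) : Int) := by omega
      have hmod : ((n : Int) % 10) = ((n % 10 : Nat) : Int) := by omega
      rw [hdiv, hmod, ih (n / 10) (by omega)]
      conv_rhs => rw [pvS.eq_def]
      rw [if_neg (show ¬ n = 0 from by omega)]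
      push_cast; ring
    · have hn : n = 0 := by omega
      subst hn
      simp [pvS]

theorem foldl_add_eq_sum (l : List Int) : ∀ init : Int, l.foldl (· + ·) init = init + l.sum := by
  induction l with
  | nil => simp
  | cons x xs ih => intro init; simp [List.foldl_cons, ih, List.sum_cons]; ring

-- ===== VERDICT (by name: the statement is the Claim_ definition above) =====
theorem solution_spec : Claim_equal_solution := by
  intro x _ hpre
  have hx1 : (1 : Int) ≤ x := hpre
  unfold Spec_solution solution solution_alt
  have hx0 : ¬ x < 0 := by omega
  have hxeq : x = ((x.toNat : Nat) : Int) := by omega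
  have hA : ((PySem.Int.toChars x).map pvCharVal).foldl (· + ·) 0 = (pvS x.toNat : Int) := by
    rw [foldl_add_eq_sum, PySem.Int.toChars]
    simp only [hx0, if_false]
    rw [Nat.toDigits, toDigitsCore_map_sum (x.toNat + 1) x.toNat (by omega) []]
    simp
  have hB : pvDigitLoop x 0 = (pvS x.toNat : Int) := by
    conv_lhs => rw [hxeq]
    rw [digitLoop_eq x.toNat 0, zero_add]
  simp only [hA, hB]
  split_ifs with h <;> simp [h]
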